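-- pv_equiv track=rewrite | github.com/2025-2-fundamentos/LAB-01-python-basico-Paulipupo | homework/pregunta_05.py | wordcount_reducer
-- ===== SOURCE A (Python) =====
-- def wordcount_reducer(mapped_data):
--     result = []
--     for key, value in mapped_data:
--         if result and result[-1][0] == key:
--             result[-1] = (key, max(result[-1][1], value), min(result[-1][2], value))
--         else:
--             result.append((key, value, value))
--
--     return result
-- ===== SOURCE B (Python) =====
-- def wordcount_reducer(mapped_data):
--     # Divide and conquer: reduce each half, then stitch the halves together,
--     # fusing the boundary entries when they carry the same key.
--     n = len(mapped_data)
--     if n == 0: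
--         return []
--     if n == 1:
--         key, value = mapped_data[0]
--         return [(key, value, value)]
--     mid = n // 2
--     left = wordcount_reducer(mapped_data[:mid])
--     right = wordcount_reducer(mapped_data[mid:])
--     if left[-1][0] == right[0][0]:
--         key, hi1, lo1 = left[-1]
--         _, hi2, lo2 = right[0]
--         return left[:-1] + [(key, max(hi1, hi2), min(lo1, lo2))] + right[1:]
--     return left + right
-- ===== Notes on version B (the rewrite author's own statement) =====
-- stated objective: alternative
-- what changed: Replaced A's single left-to-right pass merging each element into the accumulator's last entry by a divide-and-conquer recursion: reduce each half independently and stitch the halves, fusing the two boundary entries when they share a key (correct because run aggregation with max/min is associative).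
import Mathlib
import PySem

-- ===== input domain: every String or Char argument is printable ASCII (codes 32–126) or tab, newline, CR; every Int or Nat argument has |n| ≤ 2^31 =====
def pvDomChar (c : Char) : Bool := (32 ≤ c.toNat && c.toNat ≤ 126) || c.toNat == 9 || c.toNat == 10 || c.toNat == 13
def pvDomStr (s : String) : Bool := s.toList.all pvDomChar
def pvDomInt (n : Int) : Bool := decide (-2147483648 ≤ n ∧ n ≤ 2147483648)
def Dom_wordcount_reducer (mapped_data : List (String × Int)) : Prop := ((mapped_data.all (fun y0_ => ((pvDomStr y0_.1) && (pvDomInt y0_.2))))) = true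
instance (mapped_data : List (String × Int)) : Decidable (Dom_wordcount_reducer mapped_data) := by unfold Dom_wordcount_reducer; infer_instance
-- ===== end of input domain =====

-- B replaces A's single left-to-right accumulator pass by divide-and-conquer:
-- reduce each half and stitch the halves, fusing the boundary entries when keys match (alternative).

-- ===== PORT A =====
-- one loop step: update result[-1] when the last key matches, else append (key, value, value)
def wcStep (result : List (String × Int × Int)) (kv : String × Int) : List (String × Int × Int) :=
  match result.getLast? with
  | some (k, hi, lo) =>
      if k = kv.1 then result.dropLast ++ [(kv.1, max hi kv.2, min lo kv.2)]
      else result ++ [(kv.1, kv.2, kv.2)]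
  | none => result ++ [(kv.1, kv.2, kv.2)]

def wordcount_reducer (mapped_data : List (String × Int)) : List (String × Int × Int) :=
  mapped_data.foldl wcStep []

-- ===== PORT B =====
-- n // 2 on the (nonnegative) list length is Nat division; mapped_data[:mid] / [mid:]
-- are take/drop (exact for these in-range bounds: PySem.List.slice_to_natCast /
-- slice_from_natCast). left and right are nonempty (each half has ≥ 1 element), so
-- Python's left[-1] / right[0] are the two some-branches; the wildcard row is unreachable.
-- The fuel argument (started at the length, strictly above both halves' lengths) only
-- makes the recursion structural; the fuel-exhausted row is never reached.
def wcHalve (fuel : Nat) (mapped_data : List (String × Int)) : List (String × Int × Int) :=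
  match fuel with
  | 0 => []
  | fuel + 1 =>
    if mapped_data.length = 0 then []
    else if mapped_data.length = 1 then
      match mapped_data with
      | (key, value) :: _ => [(key, value, value)]
      | [] => []
    else
      let mid := mapped_data.length / 2
      let left := wcHalve fuel (mapped_data.take mid)
      let right := wcHalve fuel (mapped_data.drop mid)
      match left.getLast?, right.head? with
      | some (key, hi1, lo1), some (k2, hi2, lo2) =>
          if key = k2 then left.dropLast ++ [(key, max hi1 hi2, min lo1 lo2)] ++ right.tail
          else left ++ right
      | _, _ => left ++ right

def wordcount_reducer_alt (mapped_data : List (String × Int)) : List (String × Int × Int) :=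
  wcHalve mapped_data.length mapped_data

-- ===== PRECONDITION & SPEC =====
def Spec_wordcount_reducer (mapped_data : List (String × Int)) (out : List (String × Int × Int)) : Prop := out = wordcount_reducer_alt mapped_data
instance (mapped_data : List (String × Int)) (out : List (String × Int × Int)) : Decidable (Spec_wordcount_reducer mapped_data out) := by unfold Spec_wordcount_reducer; infer_instance

-- ===== CLAIM (what is proved, stated in full; the proofs are below) =====
def Claim_equal_wordcount_reducer : Prop := ∀ (mapped_data : List (String × Int)), Dom_wordcount_reducer mapped_data → Spec_wordcount_reducer mapped_data (wordcount_reducer mapped_data)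

-- ===== LEMMAS AND PROOFS =====

-- proof-only reference function: group consecutive equal keys by span, reduce with fold max/min
def altSpan : List (String × Int) → List (String × Int × Int)
  | [] => []
  | (k, v) :: rest =>
      let sp := rest.span (fun p => p.1 == k)
      (k, sp.1.foldl (fun a p => max a p.2) v, sp.1.foldl (fun a p => min a p.2) v)
        :: altSpan sp.2
  termination_by xs => xs.length
  decreasing_by
    simp only [List.span_eq_takeWhile_dropWhile]
    exact Nat.lt_succ_of_le (List.length_dropWhile_le _ _)

-- the boundary fusion B performs, as a standalone function (the same match as in the port)
def wcGlue (left right : List (String × Int × Int)) : List (String × Int × Int) :=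
  match left.getLast?, right.head? with
  | some (key, hi1, lo1), some (k2, hi2, lo2) =>
      if key = k2 then left.dropLast ++ [(key, max hi1 hi2, min lo1 lo2)] ++ right.tail
      else left ++ right
  | _, _ => left ++ right

-- ---------- A = altSpan ----------

theorem wcStep_ne_nil (r : List (String × Int × Int)) (kv : String × Int) (hr : r ≠ []) :
    wcStep r kv ≠ [] := by
  unfold wcStep
  rcases e : r.getLast? with _ | ⟨k, hi, lo⟩ <;> simp_all
  split <;> simp

theorem wcStep_append (d r : List (String × Int × Int)) (kv : String × Int) (hr : r ≠ []) :
    wcStep (d ++ r) kv = d ++ wcStep r kv := by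
  unfold wcStep
  rw [List.getLast?_append_of_ne_nil _ hr]
  rcases e : r.getLast? with _ | ⟨k, hi, lo⟩
  · exact absurd (List.getLast?_eq_none_iff.mp e) hr
  · simp only []
    split_ifs <;> simp [List.dropLast_append_of_ne_nil, hr, List.append_assoc]

theorem foldl_wcStep_append (d r : List (String × Int × Int)) (xs : List (String × Int))
    (hr : r ≠ []) : xs.foldl wcStep (d ++ r) = d ++ xs.foldl wcStep r := by
  induction xs generalizing r with
  | nil => rfl
  | cons x t ih =>
      simp only [List.foldl_cons, wcStep_append d r x hr]
      exact ih _ (wcStep_ne_nil r x hr)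

theorem foldl_wcStep_run (k : String) (hi lo : Int) (xs : List (String × Int)) :
    xs.foldl wcStep [(k, hi, lo)] =
      (k, (xs.takeWhile (fun p => p.1 == k)).foldl (fun a p => max a p.2) hi,
          (xs.takeWhile (fun p => p.1 == k)).foldl (fun a p => min a p.2) lo)
        :: altSpan (xs.dropWhile (fun p => p.1 == k)) := by
  induction xs generalizing k hi lo with
  | nil => simp [altSpan]
  | cons x t ih =>
      obtain ⟨k', v⟩ := x
      by_cases hk : k' = k
      · subst hk
        have hstep : wcStep [(k', hi, lo)] (k', v) = [(k', max hi v, min lo v)] := by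
          simp [wcStep]
        simp only [List.foldl_cons, hstep, List.takeWhile_cons, List.dropWhile_cons]
        simp only [beq_self_eq_true, if_true, List.foldl_cons]
        exact ih k' (max hi v) (min lo v)
      · have hstep : wcStep [(k, hi, lo)] (k', v) = [(k, hi, lo)] ++ [(k', v, v)] := by
          have hne : ¬ (k = k') := fun h => hk h.symm
          simp [wcStep, hne]
        have hb : ((k', v).1 == k) = false := by simpa using hk
        simp only [List.foldl_cons, hstep, List.takeWhile_cons, List.dropWhile_cons, hb,
          if_false, Bool.false_eq_true]
        rw [foldl_wcStep_append [(k, hi, lo)] [(k', v, v)] t (by simp), ih k' v v]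
        conv_rhs => rw [altSpan]
        simp [List.span_eq_takeWhile_dropWhile]

theorem a_eq_span (xs : List (String × Int)) : wordcount_reducer xs = altSpan xs := by
  unfold wordcount_reducer
  cases xs with
  | nil => simp [altSpan]
  | cons x t =>
      obtain ⟨k, v⟩ := x
      have h0 : wcStep [] (k, v) = [(k, v, v)] := by simp [wcStep]
      rw [List.foldl_cons, h0, foldl_wcStep_run]
      conv_rhs => rw [altSpan]
      simp [List.span_eq_takeWhile_dropWhile]

-- ---------- altSpan distributes over ++ via wcGlue ----------

theorem foldl_max_pull (l : List (String × Int)) (a b : Int) :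
    l.foldl (fun x p => max x p.2) (max a b) = max a (l.foldl (fun x p => max x p.2) b) := by
  induction l generalizing b with
  | nil => rfl
  | cons p t ih => simp only [List.foldl_cons, max_assoc, ih]

theorem foldl_min_pull (l : List (String × Int)) (a b : Int) :
    l.foldl (fun x p => min x p.2) (min a b) = min a (l.foldl (fun x p => min x p.2) b) := by
  induction l generalizing b with
  | nil => rfl
  | cons p t ih => simp only [List.foldl_cons, min_assoc, ih]

theorem altSpan_nil : altSpan ([] : List (String × Int)) = [] := by rw [altSpan]

theorem altSpan_ne_nil (xs : List (String × Int)) (hx : xs ≠ []) : altSpan xs ≠ [] := by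
  cases xs with
  | nil => exact absurd rfl hx
  | cons x t => obtain ⟨k, v⟩ := x; rw [altSpan]; simp

theorem wcGlue_cons (a : String × Int × Int) (l b : List (String × Int × Int)) (hl : l ≠ []) :
    wcGlue (a :: l) b = a :: wcGlue l b := by
  unfold wcGlue
  rw [show a :: l = [a] ++ l from rfl, List.getLast?_append_of_ne_nil _ hl]
  rcases l.getLast? with _ | ⟨k, hi, lo⟩
  · simp
  · rcases b.head? with _ | ⟨k2, hi2, lo2⟩
    · simp
    · simp only []
      split_ifs <;> simp [List.dropLast_cons_of_ne_nil hl]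

theorem span_append (xs ys : List (String × Int)) :
    altSpan (xs ++ ys) = wcGlue (altSpan xs) (altSpan ys) := by
  match xs with
  | [] =>
      rw [List.nil_append, altSpan_nil]
      unfold wcGlue; simp
  | (k, v) :: rest =>
      rw [List.cons_append, altSpan, altSpan]
      simp only [List.span_eq_takeWhile_dropWhile]
      by_cases hrest : rest.dropWhile (fun p => p.1 == k) = []
      · -- rest is one unbroken run of key k
        have hall : ∀ x ∈ rest, (x.1 == k) = true := List.dropWhile_eq_nil_iff.mp hrest
        have htake : rest.takeWhile (fun p => p.1 == k) = rest :=
          List.takeWhile_eq_self_iff.mpr hall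
        have htw : (rest ++ ys).takeWhile (fun p => p.1 == k)
            = rest ++ ys.takeWhile (fun p => p.1 == k) := by
          rw [List.takeWhile_append, if_pos (by rw [htake])]
        have hdw : (rest ++ ys).dropWhile (fun p => p.1 == k)
            = ys.dropWhile (fun p => p.1 == k) := by
          rw [List.dropWhile_append, if_pos (by rw [hrest]; rfl)]
        rw [htw, hdw, hrest, htake, altSpan_nil]
        cases ys with
        | nil =>
            simp [altSpan_nil, wcGlue]
        | cons y u =>
            obtain ⟨k2, w⟩ := y
            rw [altSpan]
            simp only [List.span_eq_takeWhile_dropWhile]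
            by_cases hk : k2 = k
            · subst hk
              simp only [List.takeWhile_cons, List.dropWhile_cons, beq_self_eq_true, if_true]
              unfold wcGlue
              simp only [List.getLast?_singleton, List.head?_cons, List.tail_cons]
              rw [List.foldl_append, List.foldl_append, List.foldl_cons, List.foldl_cons]
              rw [foldl_max_pull, foldl_min_pull]
              simp
            · have hb : (((k2, w) : String × Int).1 == k) = false := by simpa using hk
              simp only [List.takeWhile_cons, List.dropWhile_cons, hb, if_false,
                Bool.false_eq_true, List.append_nil]
              unfold wcGlue
              simp only [List.getLast?_singleton, List.head?_cons]
              have hne : ¬ (k = k2) := fun h => hk h.symm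
              rw [altSpan]
              simp [List.span_eq_takeWhile_dropWhile, hne]
      · -- the run of k ends inside rest
        have hcond : ¬ ((rest.takeWhile (fun p => p.1 == k)).length = rest.length) := by
          intro h
          exact hrest (List.dropWhile_eq_nil_iff.mpr
            (List.takeWhile_eq_self_iff.mp ((List.takeWhile_sublist _).eq_of_length h)))
        have htw : (rest ++ ys).takeWhile (fun p => p.1 == k)
            = rest.takeWhile (fun p => p.1 == k) := by
          rw [List.takeWhile_append, if_neg hcond]
        have hdw : (rest ++ ys).dropWhile (fun p => p.1 == k)
            = rest.dropWhile (fun p => p.1 == k) ++ ys := by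
          rw [List.dropWhile_append, if_neg (by rw [List.isEmpty_iff]; exact hrest)]
        rw [htw, hdw, span_append (rest.dropWhile (fun p => p.1 == k)) ys,
          wcGlue_cons _ _ _ (altSpan_ne_nil _ hrest)]
  termination_by xs.length
  decreasing_by
    exact Nat.lt_succ_of_le (List.length_dropWhile_le _ _)

-- ---------- B = altSpan ----------

theorem wcHalve_eq_span (fuel : Nat) (xs : List (String × Int)) (hle : xs.length ≤ fuel) :
    wcHalve fuel xs = altSpan xs := by
  induction fuel generalizing xs with
  | zero =>
      rw [List.length_eq_zero_iff.mp (Nat.le_zero.mp hle)]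
      simp [wcHalve, altSpan_nil]
  | succ f ih =>
      show (if xs.length = 0 then []
        else if xs.length = 1 then
          match xs with
          | (key, value) :: _ => [(key, value, value)]
          | [] => []
        else
          let mid := xs.length / 2
          let left := wcHalve f (xs.take mid)
          let right := wcHalve f (xs.drop mid)
          match left.getLast?, right.head? with
          | some (key, hi1, lo1), some (k2, hi2, lo2) =>
              if key = k2 then left.dropLast ++ [(key, max hi1 hi2, min lo1 lo2)] ++ right.tail
              else left ++ right
          | _, _ => left ++ right) = altSpan xs
      by_cases h0 : xs.length = 0
      · rw [if_pos h0, List.length_eq_zero_iff.mp h0, altSpan_nil]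
      · rw [if_neg h0]
        by_cases h1 : xs.length = 1
        · rw [if_pos h1]
          obtain ⟨x, hx⟩ := List.length_eq_one_iff.mp h1
          obtain ⟨k, v⟩ := x
          subst hx
          rw [altSpan]
          simp [altSpan_nil]
        · rw [if_neg h1]
          have htk : (xs.take (xs.length / 2)).length ≤ f := by
            simp only [List.length_take]; omega
          have hdr : (xs.drop (xs.length / 2)).length ≤ f := by
            simp only [List.length_drop]; omega
          dsimp only
          rw [ih (xs.take (xs.length / 2)) htk, ih (xs.drop (xs.length / 2)) hdr]
          rw [show (match (altSpan (xs.take (xs.length / 2))).getLast?,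
                (altSpan (xs.drop (xs.length / 2))).head? with
              | some (key, hi1, lo1), some (k2, hi2, lo2) =>
                  if key = k2 then (altSpan (xs.take (xs.length / 2))).dropLast
                      ++ [(key, max hi1 hi2, min lo1 lo2)]
                      ++ (altSpan (xs.drop (xs.length / 2))).tail
                  else altSpan (xs.take (xs.length / 2)) ++ altSpan (xs.drop (xs.length / 2))
              | _, _ => altSpan (xs.take (xs.length / 2)) ++ altSpan (xs.drop (xs.length / 2)))
              = wcGlue (altSpan (xs.take (xs.length / 2))) (altSpan (xs.drop (xs.length / 2)))
            from rfl]
          rw [← span_append, List.take_append_drop]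

theorem b_eq_span (xs : List (String × Int)) : wordcount_reducer_alt xs = altSpan xs :=
  wcHalve_eq_span xs.length xs (Nat.le_refl _)

-- ===== VERDICT (by name: the statement is the Claim_ definition above) =====
theorem wordcount_reducer_spec : Claim_equal_wordcount_reducer := by
  intro mapped_data _
  unfold Spec_wordcount_reducer
  rw [a_eq_span, b_eq_span]
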